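-- pv_equiv track=rewrite | github.com/zli12321/zli12321.github.io | VLM_Survey/build_site.py | split_table_row
-- ===== SOURCE A (Python) =====
-- def split_table_row(line):
--     """Split a markdown table row by | while respecting []() links."""
--     line = line.strip()
--     if line.startswith('|'):
--         line = line[1:]
--     if line.endswith('|'):
--         line = line[:-1]
--     cells = []
--     depth_sq = 0
--     depth_rd = 0
--     current = ''
--     for ch in line:
--         if ch == '[':
--             depth_sq += 1
--         elif ch == ']':
--             depth_sq = max(0, depth_sq - 1)
--         elif ch == '(':
--             depth_rd += 1
--         elif ch == ')':
--             depth_rd = max(0, depth_rd - 1)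
--         if ch == '|' and depth_sq == 0 and depth_rd == 0:
--             cells.append(current.strip())
--             current = ''
--         else:
--             current += ch
--     cells.append(current.strip())
--     return cells
-- ===== SOURCE B (Python) =====
-- def split_table_row(line):
--     """Split a markdown table row by | while respecting []() links.
--
--     Different decomposition: repeatedly locate the first top-level '|'
--     with fresh depth counters (valid because depths are 0 at every cut),
--     slice the cell off, and recurse on the remainder.
--     """
--     line = line.strip()
--     if line.startswith('|'):
--         line = line[1:]
--     if line.endswith('|'):
--         line = line[:-1]
--
--     def cut_index(s):
--         sq = rd = 0
--         for i, ch in enumerate(s):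
--             if ch == '[':
--                 sq += 1
--             elif ch == ']':
--                 sq = max(0, sq - 1)
--             elif ch == '(':
--                 rd += 1
--             elif ch == ')':
--                 rd = max(0, rd - 1)
--             if ch == '|' and sq == 0 and rd == 0:
--                 return i
--         return None
--
--     cells = []
--     rest = line
--     while (i := cut_index(rest)) is not None:
--         cells.append(rest[:i].strip())
--         rest = rest[i + 1:]
--     cells.append(rest.strip())
--     return cells
-- ===== Notes on version B (the rewrite author's own statement) =====
-- stated objective: alternative
-- what changed: B replaces A's single interleaved scan with an accumulator cell by a recursive split: find the first top-level '|' with fresh depth counters (sound because both depths are provably 0 at every cut), slice the cell off, recurse on the remainder.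
import Mathlib
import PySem

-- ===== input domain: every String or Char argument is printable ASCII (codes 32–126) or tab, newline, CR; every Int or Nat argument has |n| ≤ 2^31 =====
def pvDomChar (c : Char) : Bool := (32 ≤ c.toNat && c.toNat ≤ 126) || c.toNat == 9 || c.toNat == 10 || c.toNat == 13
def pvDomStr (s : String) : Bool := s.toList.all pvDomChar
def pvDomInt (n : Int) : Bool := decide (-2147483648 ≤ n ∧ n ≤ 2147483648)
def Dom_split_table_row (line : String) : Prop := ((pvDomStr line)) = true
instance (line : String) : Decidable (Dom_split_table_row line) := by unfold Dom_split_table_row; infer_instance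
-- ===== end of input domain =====

-- B is an alternative decomposition: recursive split at the first top-level '|'
-- (fresh depth counters per search) instead of A's interleaved accumulator scan.

-- ===== PORT A =====
-- the if/elif depth-update chain of both Pythons, as one step function
def pvDepthStep (c : Char) (sq rd : Int) : Int × Int :=
  if c = '[' then (sq + 1, rd)
  else if c = ']' then (max 0 (sq - 1), rd)
  else if c = '(' then (sq, rd + 1)
  else if c = ')' then (sq, max 0 (rd - 1))
  else (sq, rd)

def pvLoopA : List Char → List String → Int → Int → List Char → List String
  | [], cells, _, _, cur => cells ++ [String.ofList (PySem.Chars.strip cur)]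
  | c :: cs, cells, sq, rd, cur =>
      let p := pvDepthStep c sq rd
      if c = '|' ∧ p.1 = 0 ∧ p.2 = 0 then
        pvLoopA cs (cells ++ [String.ofList (PySem.Chars.strip cur)]) p.1 p.2 []
      else
        pvLoopA cs cells p.1 p.2 (cur ++ [c])

def split_table_row (line : String) : List String :=
  let l0 := PySem.Chars.strip line.toList
  let l1 := if PySem.Chars.startswith l0 ['|'] then PySem.Chars.slice l0 (some 1) none else l0
  let l2 := if PySem.Chars.endswith l1 ['|'] then PySem.Chars.slice l1 none (some (-1)) else l1
  pvLoopA l2 [] 0 0 []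

-- ===== PORT B =====
-- cut_index: index of the first top-level '|' of s (depth counters start at 0)
def pvCutIndex : List Char → Int → Int → Option Nat
  | [], _, _ => none
  | c :: cs, sq, rd =>
      let p := pvDepthStep c sq rd
      if c = '|' ∧ p.1 = 0 ∧ p.2 = 0 then some 0
      else (pvCutIndex cs p.1 p.2).map (· + 1)

def pvLoopB (rest : List Char) : List String :=
  match h : pvCutIndex rest 0 0 with
  | none => [String.ofList (PySem.Chars.strip rest)]
  | some i => String.ofList (PySem.Chars.strip (rest.take i)) :: pvLoopB (rest.drop (i + 1))
termination_by rest.length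
decreasing_by
  have hne : rest ≠ [] := by intro e; subst e; simp [pvCutIndex] at h
  have := List.length_pos_iff.mpr hne
  simp [List.length_drop]; omega

def split_table_row_alt (line : String) : List String :=
  let l0 := PySem.Chars.strip line.toList
  let l1 := if PySem.Chars.startswith l0 ['|'] then PySem.Chars.slice l0 (some 1) none else l0
  let l2 := if PySem.Chars.endswith l1 ['|'] then PySem.Chars.slice l1 none (some (-1)) else l1
  pvLoopB l2

-- ===== PRECONDITION & SPEC =====
def Spec_split_table_row (line : String) (out : List String) : Prop := out = split_table_row_alt line
instance (line : String) (out : List String) : Decidable (Spec_split_table_row line out) := by unfold Spec_split_table_row; infer_instance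

-- ===== CLAIM (what is proved, stated in full; the proofs are below) =====
def Claim_equal_split_table_row : Prop := ∀ (line : String), Dom_split_table_row line → Spec_split_table_row line (split_table_row line)

-- ===== LEMMAS AND PROOFS =====
theorem pvLoopB_eq (rest : List Char) :
    pvLoopB rest =
      match pvCutIndex rest 0 0 with
      | none => [String.ofList (PySem.Chars.strip rest)]
      | some i => String.ofList (PySem.Chars.strip (rest.take i)) :: pvLoopB (rest.drop (i + 1)) := by
  rw [pvLoopB]
  cases hcs : pvCutIndex rest 0 0 <;> simp

theorem pvCutIndex_cons (c : Char) (cs : List Char) (sq rd : Int) :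
    pvCutIndex (c :: cs) sq rd =
      if c = '|' ∧ (pvDepthStep c sq rd).1 = 0 ∧ (pvDepthStep c sq rd).2 = 0 then some 0
      else (pvCutIndex cs (pvDepthStep c sq rd).1 (pvDepthStep c sq rd).2).map (· + 1) := rfl

theorem pvLoopA_eq_cut (l : List Char) : ∀ (sq rd : Int) (cur : List Char) (cells : List String),
    pvLoopA l cells sq rd cur =
      cells ++ (match pvCutIndex l sq rd with
        | none => [String.ofList (PySem.Chars.strip (cur ++ l))]
        | some i => String.ofList (PySem.Chars.strip (cur ++ l.take i)) :: pvLoopB (l.drop (i + 1))) := by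
  induction l with
  | nil => intro sq rd cur cells; simp [pvLoopA, pvCutIndex]
  | cons c cs ih =>
      intro sq rd cur cells
      by_cases hc : c = '|' ∧ (pvDepthStep c sq rd).1 = 0 ∧ (pvDepthStep c sq rd).2 = 0
      · rw [show pvLoopA (c :: cs) cells sq rd cur
              = pvLoopA cs (cells ++ [String.ofList (PySem.Chars.strip cur)])
                  (pvDepthStep c sq rd).1 (pvDepthStep c sq rd).2 [] from by
            simp only [pvLoopA]; rw [if_pos hc]]
        rw [hc.2.1, hc.2.2, ih]
        simp only [List.nil_append]
        rw [← pvLoopB_eq cs]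
        rw [pvCutIndex_cons, if_pos hc]
        simp
      · rw [show pvLoopA (c :: cs) cells sq rd cur
              = pvLoopA cs cells (pvDepthStep c sq rd).1 (pvDepthStep c sq rd).2 (cur ++ [c]) from by
            simp only [pvLoopA]; rw [if_neg hc]]
        rw [ih]
        rw [pvCutIndex_cons, if_neg hc]
        cases hcs : pvCutIndex cs (pvDepthStep c sq rd).1 (pvDepthStep c sq rd).2 <;>
          simp [List.append_assoc]

-- ===== VERDICT (by name: the statement is the Claim_ definition above) =====
theorem split_table_row_spec : Claim_equal_split_table_row := by
  intro line _
  unfold Spec_split_table_row split_table_row split_table_row_alt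
  simp only []
  rw [pvLoopA_eq_cut, pvLoopB_eq]
  cases pvCutIndex _ 0 0 <;> simp
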